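-- pv_equiv track=rewrite | github.com/JiriPakr/Python_small_projects | Challanges/Medium/2024.maximize_the_confusion_of_an_exam.py | maxConsecutiveAnswers3
-- ===== SOURCE A (Python) =====
-- import sys, collections
--
-- def maxConsecutiveAnswers3(answerKey: str, k: int) -> int:
--   n = len(answerKey)
--   left, right = k, n
--
--   def isValid(size):
--     counter = collections.Counter(answerKey[:size])
--     if min(counter["T"], counter["F"]) <= k:
--       return True
--     for i in range(size, n):
--       counter[answerKey[i]] += 1
--       counter[answerKey[i - size]] -= 1
--       if min(counter["T"], counter["F"]) <= k:
--         return True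
--     return False
--
--   while left < right:
--     mid = (left + right + 1) // 2
--
--     if isValid(mid):
--       left = mid
--     else:
--       right = mid - 1
--
--   return left
-- ===== SOURCE B (Python) =====
-- def maxConsecutiveAnswers3(answerKey: str, k: int) -> int:
--     # Single-pass non-shrinking sliding window: the window grows by one whenever
--     # the current window is valid (minority count <= k), otherwise it slides.
--     # The result is never below k (A's binary search starts at left = k and
--     # returns k unchanged when k >= len(answerKey)), hence the final max.
--     countT = countF = 0
--     left = 0
--     for right in range(len(answerKey)):
--         c = answerKey[right]
--         if c == 'T':
--             countT += 1
--         elif c == 'F':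
--             countF += 1
--         if min(countT, countF) > k:
--             d = answerKey[left]
--             if d == 'T':
--                 countT -= 1
--             elif d == 'F':
--                 countF -= 1
--             left += 1
--     return max(k, len(answerKey) - left)
-- ===== Notes on version B (the rewrite author's own statement) =====
-- stated objective: faster
-- what changed: Replaced A's binary search over window sizes (each probe re-scanning the whole string with a rolling Counter) by a single-pass non-shrinking sliding window that tracks only the T/F counts of the current window; a final max with k reproduces A's floor of k on the result.
-- outside the precondition, e.g. on maxConsecutiveAnswers3('T', -1): A returns -1, B returns 0; on maxConsecutiveAnswers3('TTFF', -3): A raises IndexError, B returns 0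
import Mathlib
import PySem

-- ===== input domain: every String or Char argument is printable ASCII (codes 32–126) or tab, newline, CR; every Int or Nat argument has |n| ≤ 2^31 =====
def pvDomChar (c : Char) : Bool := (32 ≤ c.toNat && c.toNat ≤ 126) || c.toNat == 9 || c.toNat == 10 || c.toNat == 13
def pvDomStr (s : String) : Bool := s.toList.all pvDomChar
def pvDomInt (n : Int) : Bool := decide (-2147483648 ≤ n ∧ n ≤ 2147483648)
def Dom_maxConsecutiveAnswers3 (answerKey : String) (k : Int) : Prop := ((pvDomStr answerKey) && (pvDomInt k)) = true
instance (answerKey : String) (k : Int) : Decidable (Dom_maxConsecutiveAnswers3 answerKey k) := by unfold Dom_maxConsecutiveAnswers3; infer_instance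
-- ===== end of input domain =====

-- B replaces A's binary search over window sizes (each probe rescanning the string with a
-- rolling Counter) by a single-pass non-shrinking sliding window; equivalence is about the
-- return value (neither program mutates its arguments).

-- ===== PORT A =====
-- 'for i in range(size, n): counter[answerKey[i]] += 1; counter[answerKey[i-size]] -= 1; if min(...) <= k: return True'
-- (PySem.List.pyGet? = none is Python's IndexError; it never fires for the sizes the search
--  probes when 0 ≤ k — negative sizes, where Python raises, are excluded by Pre_.)
def pvIsValidLoop (s : List Char) (k size : Int) : PySem.Dict Char Int → List Int → Bool
  | _, [] => false
  | d, i :: rest =>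
    match PySem.List.pyGet? s i, PySem.List.pyGet? s (i - size) with
    | some a, some b =>
      let d2 := (d.modify a 0 (· + 1)).modify b 0 (· - 1)
      if min (d2.getD 'T' 0) (d2.getD 'F' 0) ≤ k then true
      else pvIsValidLoop s k size d2 rest
    | _, _ => false

-- 'counter = collections.Counter(answerKey[:size]); if min(counter["T"], counter["F"]) <= k: return True; for i in range(size, n): ...'
def pvIsValid (s : List Char) (k size : Int) : Bool :=
  let counter := PySem.Dict.counter (PySem.List.slice s none (some size))
  if min (counter.getD 'T' 0) (counter.getD 'F' 0) ≤ k then true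
  else pvIsValidLoop s k size counter (PySem.List.pyRange size (s.length : Int) 1)

-- 'while left < right: mid = (left + right + 1) // 2; if isValid(mid): left = mid else: right = mid - 1'
-- (the loop is made total with a fuel argument; (right - left).toNat steps always suffice,
--  since each iteration shrinks right - left by at least one)
def pvSearchGo (s : List Char) (k : Int) : Nat → Int → Int → Int
  | 0, left, _ => left
  | fuel + 1, left, right =>
    if left < right then
      let mid := PySem.Int.floordiv (left + right + 1) 2
      if pvIsValid s k mid then pvSearchGo s k fuel mid right
      else pvSearchGo s k fuel left (mid - 1)
    else left

def pvSearch (s : List Char) (k left right : Int) : Int :=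
  pvSearchGo s k (right - left).toNat left right

def maxConsecutiveAnswers3 (answerKey : String) (k : Int) : Int :=
  pvSearch answerKey.toList k k (answerKey.toList.length : Int)

-- ===== PORT B =====
-- one iteration of 'for right in range(len(answerKey)):' with state (countT, countF, left);
-- 'answerKey[left]' is read with getD: left < len(answerKey) holds throughout the loop, so it is exact
def pvWinStep (s : List Char) (k : Int) (st : Int × Int × Nat) (c : Char) : Int × Int × Nat :=
  let cT := if c = 'T' then st.1 + 1 else st.1
  let cF := if c = 'F' then st.2.1 + 1 else st.2.1
  let l := st.2.2
  if k < min cT cF then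
    let d := s.getD l ' '
    ((if d = 'T' then cT - 1 else cT), (if d = 'F' then cF - 1 else cF), l + 1)
  else (cT, cF, l)

def maxConsecutiveAnswers3_alt (answerKey : String) (k : Int) : Int :=
  let s := answerKey.toList
  let st := s.foldl (pvWinStep s k) (0, 0, 0)
  max k ((s.length : Int) - (st.2.2 : Int))

-- ===== PRECONDITION & SPEC =====
-- Pre_ excludes negative k only: there Python A raises IndexError on most inputs (its binary
-- search probes negative window sizes) and returns the meaningless -1 on the rest (k = -1).
def Pre_maxConsecutiveAnswers3 (answerKey : String) (k : Int) : Prop := 0 ≤ k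
instance (answerKey : String) (k : Int) : Decidable (Pre_maxConsecutiveAnswers3 answerKey k) := by unfold Pre_maxConsecutiveAnswers3; infer_instance
def pvWitness_maxConsecutiveAnswers3 : String × Int := ("TF", 1)

def Spec_maxConsecutiveAnswers3 (answerKey : String) (k : Int) (out : Int) : Prop := out = maxConsecutiveAnswers3_alt answerKey k
instance (answerKey : String) (k : Int) (out : Int) : Decidable (Spec_maxConsecutiveAnswers3 answerKey k out) := by unfold Spec_maxConsecutiveAnswers3; infer_instance

-- ===== CLAIM (what is proved, stated in full; the proofs are below) =====
def Claim_equal_maxConsecutiveAnswers3 : Prop := ∀ (answerKey : String) (k : Int), Dom_maxConsecutiveAnswers3 answerKey k → Pre_maxConsecutiveAnswers3 answerKey k → Spec_maxConsecutiveAnswers3 answerKey k (maxConsecutiveAnswers3 answerKey k)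

-- ===== LEMMAS AND PROOFS =====

-- 'some window w has min(#T, #F) ≤ k'
def pvOk (k : Int) (w : List Char) : Prop := min ((w.count 'T' : Int)) ((w.count 'F' : Int)) ≤ k

-- 'within the first r characters there is an ok window of length m'
def pvVU (s : List Char) (k : Int) (r m : Nat) : Prop :=
  ∃ w, w <:+: s.take r ∧ w.length = m ∧ pvOk k w

theorem pvOk_sublist {k : Int} {w w' : List Char} (hs : List.Sublist w' w) (h : pvOk k w) : pvOk k w' := by
  have hT := hs.count_le 'T'
  have hF := hs.count_le 'F'
  unfold pvOk at *
  omega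

theorem pvVU_zero {s : List Char} {k : Int} (hk : 0 ≤ k) (r : Nat) : pvVU s k r 0 :=
  ⟨[], List.nil_infix, rfl, by unfold pvOk; simp; omega⟩

theorem pvVU_mono_r {s : List Char} {k : Int} {r r' m : Nat} (h : r ≤ r') (hv : pvVU s k r m) :
    pvVU s k r' m := by
  obtain ⟨w, hw, hl, hok⟩ := hv
  refine ⟨w, ?_, hl, hok⟩
  have : s.take r <+: s.take r' := by
    rw [show s.take r = (s.take r').take r by rw [List.take_take]; congr 1; omega]
    exact List.take_prefix _ _
  exact hw.trans this.isInfix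

theorem pvVU_pred {s : List Char} {k : Int} {r m : Nat} (hv : pvVU s k r (m + 1)) :
    pvVU s k r m := by
  obtain ⟨w, hw, hl, hok⟩ := hv
  exact ⟨w.dropLast, (w.dropLast_prefix.isInfix).trans hw, by simp [hl],
    pvOk_sublist w.dropLast_prefix.sublist hok⟩

theorem pvVU_mono_down {s : List Char} {k : Int} {r : Nat} :
    ∀ {m m' : Nat}, m' ≤ m → pvVU s k r m → pvVU s k r m' := by
  intro m
  induction m with
  | zero => intro m' h hv; interval_cases m'; exact hv
  | succ n ih =>
    intro m' h hv
    rcases Nat.eq_or_lt_of_le h with rfl | hlt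
    · exact hv
    · exact ih (by omega) (pvVU_pred hv)

theorem pv_counts_le_length (w : List Char) : w.count 'T' + w.count 'F' ≤ w.length := by
  induction w with
  | nil => simp
  | cons c t ih =>
    simp only [List.count_cons, List.length_cons]
    by_cases hT : c = 'T' <;> by_cases hF : c = 'F' <;> simp_all <;> omega

theorem pv_suffix_eq_of_length {u v t : List Char} (hu : u <:+ t) (hv : v <:+ t)
    (h : u.length = v.length) : u = v := by
  obtain ⟨a, rfl⟩ := hu
  obtain ⟨b, hb⟩ := hv
  have hab : a.length = b.length := by
    have := congrArg List.length hb
    simp at this; omega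
  exact (List.append_inj hb.symm hab).2

-- a window inside the first r+1 characters either fits in the first r, or ends exactly at r+1
theorem pv_infix_take_succ {s : List Char} {r : Nat} (hr : r < s.length) {w : List Char}
    (h : w <:+: s.take (r + 1)) : w <:+: s.take r ∨ w <:+ s.take (r + 1) := by
  obtain ⟨a, b, hab⟩ := h
  cases b with
  | nil => right; exact ⟨a, by simpa using hab⟩
  | cons x xs =>
    left
    have hlen : a.length + w.length + xs.length + 1 = r + 1 := by
      have hl := congrArg List.length hab
      simp only [List.length_append, List.length_cons, List.length_take] at hl
      omega
    have hpre1 : (a ++ w) <+: s.take (r + 1) := ⟨x :: xs, by simpa [List.append_assoc] using hab⟩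
    have hpre : (a ++ w) <+: s.take r := by
      rw [List.prefix_take_iff]
      refine ⟨(List.prefix_take_iff.mp hpre1).1, ?_⟩
      simp only [List.length_append]
      omega
    exact ((List.suffix_append a w).isInfix).trans hpre.isInfix

theorem pv_take_succ_concat {s : List Char} {r : Nat} (hr : r < s.length) :
    s.take (r + 1) = s.take r ++ [s[r]] := by
  rw [List.take_add_one]
  simp [List.getElem?_eq_getElem hr]

theorem pv_drop_take_infix (s : List Char) (j d : Nat) : (s.take j).drop d <:+: s :=
  ((s.take j).drop_suffix d).isInfix.trans (s.take_prefix j).isInfix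

-- ===== A-side: the rolling-Counter scan of isValid checks exactly the windows of the given size =====

-- the size-window ending at position j
def pvWinEnd (s : List Char) (size j : Nat) : List Char := (s.take j).drop (j - size)

theorem pvWinEnd_cons {s : List Char} {size i : Nat} (h1 : 1 ≤ size) (hsi : size ≤ i)
    (hin : i ≤ s.length) (hi : i - size < s.length) :
    pvWinEnd s size i = s[i - size] :: (s.take i).drop (i - size + 1) := by
  unfold pvWinEnd
  rw [List.drop_eq_getElem_cons (by simp; omega)]
  congr 1
  exact List.getElem_take

theorem pvWinEnd_succ {s : List Char} {size i : Nat} (h1 : 1 ≤ size) (hsi : size ≤ i)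
    (hin : i < s.length) :
    pvWinEnd s size (i + 1) = (s.take i).drop (i - size + 1) ++ [s[i]] := by
  unfold pvWinEnd
  rw [pv_take_succ_concat hin, List.drop_append_of_le_length (by simp; omega)]
  congr 2
  omega

theorem pv_getD_modify2 (d : PySem.Dict Char Int) (a b c : Char) :
    ((d.modify a 0 (· + 1)).modify b 0 (· - 1)).getD c 0
      = d.getD c 0 + (if a = c then 1 else 0) - (if b = c then 1 else 0) := by
  have hab : ∀ (x y : Char), x ≠ y → (if y = x then (1:Int) else 0) = 0 := by
    intro x y h; rw [if_neg (fun hh => h hh.symm)]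
  by_cases h1 : c = b
  · subst h1
    by_cases h2 : c = a
    · subst h2
      rw [PySem.Dict.getD_modify, if_pos rfl, PySem.Dict.getD_modify, if_pos rfl]
      simp
    · rw [PySem.Dict.getD_modify, if_pos rfl, PySem.Dict.getD_modify, if_neg h2]
      rw [hab c a h2, if_pos rfl]
      ring
  · rw [PySem.Dict.getD_modify, if_neg h1]
    rw [hab c b h1]
    by_cases h2 : c = a
    · subst h2
      rw [PySem.Dict.getD_modify, if_pos rfl, if_pos rfl]
      ring
    · rw [PySem.Dict.getD_modify, if_neg h2]
      rw [hab c a h2]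
      ring

theorem pvLoopSpec (s : List Char) (k : Int) (size : Nat) (h1 : 1 ≤ size) :
    ∀ t i, s.length - i = t → size ≤ i → i ≤ s.length →
    ∀ d : PySem.Dict Char Int,
      d.getD 'T' 0 = ((pvWinEnd s size i).count 'T' : Int) →
      d.getD 'F' 0 = ((pvWinEnd s size i).count 'F' : Int) →
      (pvIsValidLoop s k (size : Int) d (PySem.List.pyRange (i : Int) (s.length : Int) 1) = true ↔
        ∃ j, i < j ∧ j ≤ s.length ∧ pvOk k (pvWinEnd s size j)) := by
  intro t
  induction t with
  | zero =>
    intro i ht hsi hin d hdT hdF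
    rw [PySem.List.pyRange_one_eq_nil (by omega)]
    simp only [pvIsValidLoop]
    constructor
    · intro h; cases h
    · rintro ⟨j, hj1, hj2, -⟩; omega
  | succ t ih =>
    intro i ht hsi hin d hdT hdF
    have hin' : i < s.length := by omega
    rw [PySem.List.pyRange_one_cons (by exact_mod_cast hin')]
    have hc1 : ((i : Int) + 1) = ((i + 1 : Nat) : Int) := by push_cast; ring
    have hg1 : PySem.List.pyGet? s (i : Int) = some s[i] := by
      rw [PySem.List.pyGet?_natCast]; simp [List.getElem?_eq_getElem hin']
    have hg2 : PySem.List.pyGet? s ((i : Int) - (size : Int)) = some s[i - size] := by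
      have hsub : (i : Int) - (size : Int) = ((i - size : Nat) : Int) := by omega
      rw [hsub, PySem.List.pyGet?_natCast]
      simp [List.getElem?_eq_getElem (show i - size < s.length by omega)]
    simp only [pvIsValidLoop, hg1, hg2]
    have hwc := pvWinEnd_cons h1 hsi hin (show i - size < s.length by omega)
    have hws := pvWinEnd_succ h1 hsi hin'
    have key : ∀ c : Char,
        (((d.modify s[i] 0 (· + 1)).modify s[i - size] 0 (· - 1)).getD c 0 : Int)
          = d.getD c 0 + (if s[i] = c then 1 else 0) - (if s[i - size] = c then 1 else 0) := by
      intro c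
      exact pv_getD_modify2 d s[i] s[i - size] c
    have hcount : ∀ c : Char, ((pvWinEnd s size (i + 1)).count c : Int)
        = ((pvWinEnd s size i).count c : Int)
          + (if s[i] = c then 1 else 0) - (if s[i - size] = c then 1 else 0) := by
      intro c
      rw [hws, hwc]
      simp only [List.count_append, List.count_cons, List.count_nil]
      by_cases hA : s[i] = c <;> by_cases hB : s[i - size] = c <;>
        simp [hA, hB] <;> push_cast <;> omega
    have hdT2 : ((d.modify s[i] 0 (· + 1)).modify s[i - size] 0 (· - 1)).getD 'T' 0
        = ((pvWinEnd s size (i + 1)).count 'T' : Int) := by rw [key 'T', hdT, hcount 'T']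
    have hdF2 : ((d.modify s[i] 0 (· + 1)).modify s[i - size] 0 (· - 1)).getD 'F' 0
        = ((pvWinEnd s size (i + 1)).count 'F' : Int) := by rw [key 'F', hdF, hcount 'F']
    have hok_iff : (min (((d.modify s[i] 0 (· + 1)).modify s[i - size] 0 (· - 1)).getD 'T' 0)
        (((d.modify s[i] 0 (· + 1)).modify s[i - size] 0 (· - 1)).getD 'F' 0) ≤ k)
        ↔ pvOk k (pvWinEnd s size (i + 1)) := by
      rw [hdT2, hdF2]; unfold pvOk; rfl
    by_cases hcond : min (((d.modify s[i] 0 (· + 1)).modify s[i - size] 0 (· - 1)).getD 'T' 0)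
        (((d.modify s[i] 0 (· + 1)).modify s[i - size] 0 (· - 1)).getD 'F' 0) ≤ k
    · simp only [if_pos hcond]
      constructor
      · intro _; exact ⟨i + 1, by omega, by omega, hok_iff.mp hcond⟩
      · intro _; trivial
    · simp only [if_neg hcond]
      rw [hc1, ih (i + 1) (by omega) (by omega) (by omega) _ hdT2 hdF2]
      constructor
      · rintro ⟨j, hj1, hj2, hj3⟩; exact ⟨j, by omega, hj2, hj3⟩
      · rintro ⟨j, hj1, hj2, hj3⟩
        rcases Nat.eq_or_lt_of_le hj1 with hj | hj
        · exact absurd (hok_iff.mpr (by rw [show i + 1 = j from hj]; exact hj3)) hcond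
        · exact ⟨j, hj, hj2, hj3⟩

theorem pvIsValidSpec (s : List Char) (k : Int) (size : Nat) (h1 : 1 ≤ size) (h2 : size ≤ s.length) :
    (pvIsValid s k (size : Int) = true ↔ ∃ j, size ≤ j ∧ j ≤ s.length ∧ pvOk k (pvWinEnd s size j)) := by
  unfold pvIsValid
  rw [PySem.List.slice_to_natCast]
  have hwe : pvWinEnd s size size = s.take size := by
    unfold pvWinEnd; simp
  have hdT : (PySem.Dict.counter (s.take size)).getD 'T' 0 = ((pvWinEnd s size size).count 'T' : Int) := by
    rw [PySem.Dict.getD_counter, hwe]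
  have hdF : (PySem.Dict.counter (s.take size)).getD 'F' 0 = ((pvWinEnd s size size).count 'F' : Int) := by
    rw [PySem.Dict.getD_counter, hwe]
  have hok_iff : (min ((PySem.Dict.counter (s.take size)).getD 'T' 0)
      ((PySem.Dict.counter (s.take size)).getD 'F' 0) ≤ k) ↔ pvOk k (pvWinEnd s size size) := by
    rw [hdT, hdF]; exact Iff.rfl
  by_cases hcond : min ((PySem.Dict.counter (s.take size)).getD 'T' 0)
      ((PySem.Dict.counter (s.take size)).getD 'F' 0) ≤ k
  · simp only [if_pos hcond]
    constructor
    · intro _; exact ⟨size, le_refl _, h2, hok_iff.mp hcond⟩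
    · intro _; trivial
  · simp only [if_neg hcond]
    rw [pvLoopSpec s k size h1 (s.length - size) size rfl (le_refl _) h2 _ hdT hdF]
    constructor
    · rintro ⟨j, hj1, hj2, hj3⟩; exact ⟨j, by omega, hj2, hj3⟩
    · rintro ⟨j, hj1, hj2, hj3⟩
      rcases Nat.eq_or_lt_of_le hj1 with rfl | hlt
      · exact absurd (hok_iff.mpr hj3) hcond
      · exact ⟨j, hlt, hj2, hj3⟩

theorem pvVU_iff_winEnd (s : List Char) (k : Int) (size : Nat) (h2 : size ≤ s.length) :
    (pvVU s k s.length size ↔ ∃ j, size ≤ j ∧ j ≤ s.length ∧ pvOk k (pvWinEnd s size j)) := by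
  constructor
  · rintro ⟨w, hw, hl, hok⟩
    rw [List.take_length] at hw
    obtain ⟨a, b, hab⟩ := hw
    have hlab : a.length + size + b.length = s.length := by
      have hlen := congrArg List.length hab
      simp [hl] at hlen; omega
    refine ⟨a.length + size, by omega, by omega, ?_⟩
    have hwe : pvWinEnd s size (a.length + size) = w := by
      unfold pvWinEnd
      have h1 : s.take (a.length + size) = a ++ w := by
        rw [← hab]
        exact List.take_left' (by simp [hl])
      rw [h1, show a.length + size - size = a.length by omega, List.drop_left]
    rw [hwe]; exact hok
  · rintro ⟨j, hj1, hj2, hok⟩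
    refine ⟨pvWinEnd s size j, ?_, ?_, hok⟩
    · rw [List.take_length]; exact pv_drop_take_infix s j (j - size)
    · unfold pvWinEnd; simp; omega

theorem pvSearchGoSpec (s : List Char) (k : Int) (hk : 0 ≤ k) :
    ∀ (fuel : Nat) (L R : Int), (R - L).toNat ≤ fuel → 0 ≤ L → L ≤ R → R ≤ (s.length : Int) →
    pvVU s k s.length L.toNat → (∀ m : Nat, pvVU s k s.length m → (m : Int) ≤ R) →
    0 ≤ pvSearchGo s k fuel L R ∧ pvVU s k s.length (pvSearchGo s k fuel L R).toNat ∧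
      (∀ m : Nat, pvVU s k s.length m → (m : Int) ≤ pvSearchGo s k fuel L R) := by
  intro fuel
  induction fuel with
  | zero =>
    intro L R hf h0 hLR hRn hvL hub
    have hLR' : L = R := by omega
    simp only [pvSearchGo]
    exact ⟨h0, hvL, fun m hm => by have := hub m hm; omega⟩
  | succ fuel ih =>
    intro L R hf h0 hLR hRn hvL hub
    simp only [pvSearchGo]
    by_cases h : L < R
    · simp only [if_pos h]
      have hb := PySem.Int.floordiv_two_mid_bounds (lo := L + 1) (hi := R) (by omega)
      have he : (L + 1) + R = L + R + 1 := by ring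
      rw [he] at hb
      set mid := PySem.Int.floordiv (L + R + 1) 2 with hmid
      have hm1 : L + 1 ≤ mid := hb.1
      have hm2 : mid ≤ R := hb.2
      have hmn : mid = ((mid.toNat : Nat) : Int) := by omega
      have hiv : (pvIsValid s k mid = true ↔ pvVU s k s.length mid.toNat) := by
        rw [hmn]
        rw [pvIsValidSpec s k mid.toNat (by omega) (by omega)]
        exact (pvVU_iff_winEnd s k mid.toNat (by omega)).symm
      by_cases hv : pvIsValid s k mid = true
      · rw [if_pos hv]
        exact ih mid R (by omega) (by omega) (by omega) hRn (hiv.mp hv) hub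
      · rw [if_neg hv]
        refine ih L (mid - 1) (by omega) h0 (by omega) (by omega) hvL ?_
        intro m hm
        by_contra hcon
        have hge : mid.toNat ≤ m := by omega
        exact hv (hiv.mpr (pvVU_mono_down hge hm))
    · simp only [if_neg h]
      exact ⟨h0, hvL, fun m hm => by have := hub m hm; omega⟩

-- ===== B-side: the sliding-window loop invariant =====

def pvBInv (s : List Char) (k : Int) (r : Nat) (st : Int × Int × Nat) : Prop :=
  st.2.2 ≤ r ∧
  st.1 = (((s.take r).drop st.2.2).count 'T' : Int) ∧
  st.2.1 = (((s.take r).drop st.2.2).count 'F' : Int) ∧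
  pvVU s k r (r - st.2.2) ∧
  (∀ m, pvVU s k r m → m ≤ r - st.2.2)

theorem pvBStep (s : List Char) (k : Int) (hk : 0 ≤ k) (r : Nat) (hr : r < s.length)
    (st : Int × Int × Nat) (h : pvBInv s k r st) :
    pvBInv s k (r + 1) (pvWinStep s k st s[r]) := by
  obtain ⟨cT, cF, l⟩ := st
  obtain ⟨hlr, hcT, hcF, hvu, hmax⟩ := h
  simp only [pvBInv] at *
  -- the window [l, r+1) is the old window with s[r] appended
  have hcur : (s.take (r + 1)).drop l = (s.take r).drop l ++ [s[r]] := by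
    rw [pv_take_succ_concat hr, List.drop_append_of_le_length (by simp; omega)]
  have hlen1 : ((s.take (r + 1)).drop l).length = r + 1 - l := by simp; omega
  have hcT' : (if s[r] = 'T' then cT + 1 else cT) = (((s.take (r + 1)).drop l).count 'T' : Int) := by
    rw [hcur, List.count_append, hcT]
    by_cases hA : s[r] = 'T' <;> simp [hA]
  have hcF' : (if s[r] = 'F' then cF + 1 else cF) = (((s.take (r + 1)).drop l).count 'F' : Int) := by
    rw [hcur, List.count_append, hcF]
    by_cases hA : s[r] = 'F' <;> simp [hA]
  -- maximality helper shared by both branches: a window within the first r+1 chars that is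
  -- not within the first r chars is a suffix of s.take (r+1)
  by_cases hcond : k < min (if s[r] = 'T' then cT + 1 else cT) (if s[r] = 'F' then cF + 1 else cF)
  · -- shrink branch
    simp only [pvWinStep, if_pos hcond]
    have hln : l < s.length := by omega
    have hd : s.getD l ' ' = s[l] := List.getD_eq_getElem s ' ' hln
    have hcons : (s.take (r + 1)).drop l = s[l] :: (s.take (r + 1)).drop (l + 1) := by
      rw [List.drop_eq_getElem_cons (by simp; omega)]
      congr 1
      exact List.getElem_take
    have hnotok : ¬ pvOk k ((s.take (r + 1)).drop l) := by
      unfold pvOk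
      rw [← hcT', ← hcF']
      omega
    refine ⟨by omega, ?_, ?_, ?_, ?_⟩
    · -- T count after removing s[l]
      simp only [hd]
      rw [hcons] at hcT'
      simp only [List.count_cons] at hcT'
      by_cases hB : s[l] = 'T' <;> simp [hB] at hcT' ⊢ <;> omega
    · simp only [hd]
      rw [hcons] at hcF'
      simp only [List.count_cons] at hcF'
      by_cases hB : s[l] = 'F' <;> simp [hB] at hcF' ⊢ <;> omega
    · -- an ok window of the unchanged size r - l still exists
      have : r + 1 - (l + 1) = r - l := by omega
      rw [this]
      exact pvVU_mono_r (by omega) hvu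
    · -- maximality: no ok window of length > r - l fits in the first r+1 characters
      intro m hm
      obtain ⟨w, hw, hlw, hok⟩ := hm
      by_contra hcon
      rcases pv_infix_take_succ hr hw with hc | hc
      · exact absurd (hmax m ⟨w, hc, hlw, hok⟩) (by omega)
      · have hw2 : w.drop (m - (r + 1 - l)) <:+ s.take (r + 1) :=
          (w.drop_suffix _).trans hc
        have heq : w.drop (m - (r + 1 - l)) = (s.take (r + 1)).drop l :=
          pv_suffix_eq_of_length hw2 ((s.take (r + 1)).drop_suffix l)
            (by rw [hlen1]; simp [hlw]; omega)
        exact hnotok (heq ▸ pvOk_sublist (List.drop_sublist _ _) hok)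
  · simp only [pvWinStep, if_neg hcond]
    refine ⟨by omega, hcT', hcF', ?_, ?_⟩
    · refine ⟨(s.take (r + 1)).drop l, ((s.take (r + 1)).drop_suffix l).isInfix, hlen1, ?_⟩
      unfold pvOk
      rw [← hcT', ← hcF']
      omega
    · -- maximality
      intro m hm
      obtain ⟨w, hw, hlw, hok⟩ := hm
      rcases pv_infix_take_succ hr hw with hc | hc
      · have := hmax m ⟨w, hc, hlw, hok⟩
        omega
      · cases m with
        | zero => omega
        | succ m' =>
          have hwne : w ≠ [] := by intro hh; simp [hh] at hlw
          obtain ⟨a, ha⟩ := hc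
          have hdl : a ++ w.dropLast = s.take r := by
            rw [← List.dropLast_append_of_ne_nil hwne, ha, pv_take_succ_concat hr,
              List.dropLast_concat]
          have := hmax m' ⟨w.dropLast, (show w.dropLast <:+ s.take r from ⟨a, hdl⟩).isInfix,
            by simp [hlw], pvOk_sublist w.dropLast_prefix.sublist hok⟩
          omega

theorem pvBFoldInv (s : List Char) (k : Int) (hk : 0 ≤ k) :
    ∀ r, r ≤ s.length → pvBInv s k r ((s.take r).foldl (pvWinStep s k) (0, 0, 0)) := by
  intro r
  induction r with
  | zero =>
    intro _
    simp only [List.take_zero, List.foldl_nil]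
    refine ⟨le_refl 0, by simp, by simp, pvVU_zero hk 0, ?_⟩
    rintro m ⟨w, hw, hlw, -⟩
    rw [List.take_zero, List.infix_nil] at hw
    subst hw
    simp at hlw
    omega
  | succ r ihr =>
    intro hr1
    rw [pv_take_succ_concat (by omega), List.foldl_append]
    simp only [List.foldl_cons, List.foldl_nil]
    exact pvBStep s k hk r (by omega) _ (ihr (by omega))

-- ===== VERDICT (by name: the statement is the Claim_ definition above) =====
theorem maxConsecutiveAnswers3_spec : Claim_equal_maxConsecutiveAnswers3 := by
  intro answerKey k hpre hdom
  have hk : (0 : Int) ≤ k := hdom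
  set s := answerKey.toList with hs
  show maxConsecutiveAnswers3 answerKey k = maxConsecutiveAnswers3_alt answerKey k
  simp only [maxConsecutiveAnswers3, maxConsecutiveAnswers3_alt, ← hs]
  have hBI := pvBFoldInv s k hk s.length (le_refl _)
  rw [List.take_length] at hBI
  obtain ⟨hls, hT, hF, hvu, hmax⟩ := hBI
  by_cases hkn : k ≤ (s.length : Int)
  · have hvL : pvVU s k s.length k.toNat := by
      refine ⟨s.take k.toNat, ?_, ?_, ?_⟩
      · rw [List.take_length]; exact (s.take_prefix _).isInfix
      · simp; omega
      · have hc := pv_counts_le_length (s.take k.toNat)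
        have hlen : (s.take k.toNat).length = min k.toNat s.length := by simp
        unfold pvOk
        omega
    have hub : ∀ m : Nat, pvVU s k s.length m → (m : Int) ≤ (s.length : Int) := by
      rintro m ⟨w, hw, hlw, -⟩
      rw [List.take_length] at hw
      have := hw.length_le
      omega
    unfold pvSearch
    obtain ⟨hA0, hAvu, hAub⟩ := pvSearchGoSpec s k hk (((s.length : Int) - k).toNat) k
      (s.length : Int) (le_refl _) hk hkn (le_refl _) hvL hub
    have h1 := hmax _ hAvu
    have h2 := hAub _ hvu
    have h3 := hmax _ hvL
    omega
  · unfold pvSearch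
    rw [show ((s.length : Int) - k).toNat = 0 by omega]
    simp only [pvSearchGo]
    omega
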